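-- pv_equiv track=rewrite | github.com/TheSonder/2d-rt | python/examples/compare_radiomapseer_feature_maps.py | _group_from_minimal_grid
-- ===== SOURCE A (Python) =====
-- def _group_from_minimal_grid(
--     visibility_order_grid: list[list[int]],
--     target: str,
--     max_order: int,
-- ) -> list[list[str]]:
--     grouped: list[list[str]] = []
--     for row in visibility_order_grid:
--         grouped_row: list[str] = []
--         for value in row:
--             label = int(value)
--             if label == -2:
--                 grouped_row.append("blocked")
--             elif label == -1:
--                 grouped_row.append("unreachable")
--             elif label == 0:
--                 grouped_row.append("L")
--             elif label == 1 and max_order >= 1: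
--                 grouped_row.append("I1")
--             elif label == 2 and target == "irt2" and max_order >= 2:
--                 grouped_row.append("I2")
--             else:
--                 grouped_row.append("unreachable")
--         grouped.append(grouped_row)
--     return grouped
-- ===== SOURCE B (Python) =====
-- def _group_from_minimal_grid(
--     visibility_order_grid: list[list[int]],
--     target: str,
--     max_order: int,
-- ) -> list[list[str]]:
--     # Paint-pass algorithm: start with everything "unreachable", then make one
--     # overwrite pass over the grid per active code (codes are distinct, so the
--     # order of passes does not matter).
--     out = [["unreachable"] * len(row) for row in visibility_order_grid]
--     passes = [(-2, "blocked"), (0, "L")]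
--     if max_order >= 1:
--         passes.append((1, "I1"))
--     if target == "irt2" and max_order >= 2:
--         passes.append((2, "I2"))
--     for code, label in passes:
--         for i, row in enumerate(visibility_order_grid):
--             for j, value in enumerate(row):
--                 if int(value) == code:
--                     out[i][j] = label
--     return out
-- ===== Notes on version B (the rewrite author's own statement) =====
-- stated objective: alternative
-- what changed: A maps each cell in one pass through a per-cell if/elif cascade; B is a multi-pass paint algorithm: it first fills the whole output with 'unreachable', builds the list of active (code,label) passes from target/max_order, then for each pass sweeps the grid overwriting the cells equal to that code.
import Mathlib
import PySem

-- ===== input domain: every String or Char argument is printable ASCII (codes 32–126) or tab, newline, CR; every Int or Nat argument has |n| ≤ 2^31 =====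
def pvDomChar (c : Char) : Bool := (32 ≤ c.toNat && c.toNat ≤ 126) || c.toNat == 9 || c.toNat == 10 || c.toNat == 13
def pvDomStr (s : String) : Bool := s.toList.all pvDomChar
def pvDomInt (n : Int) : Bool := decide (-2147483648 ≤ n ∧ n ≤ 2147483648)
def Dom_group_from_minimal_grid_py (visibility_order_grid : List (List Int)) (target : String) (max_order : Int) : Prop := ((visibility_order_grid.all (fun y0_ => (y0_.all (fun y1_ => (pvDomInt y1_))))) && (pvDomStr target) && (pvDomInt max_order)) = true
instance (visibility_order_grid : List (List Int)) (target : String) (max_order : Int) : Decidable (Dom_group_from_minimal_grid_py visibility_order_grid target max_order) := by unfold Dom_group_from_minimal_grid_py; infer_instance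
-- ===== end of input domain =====

-- B replaces A's single pass with a per-cell if/elif cascade by a multi-pass paint algorithm:
-- fill the output with "unreachable", then one overwrite sweep per active (code,label) pass
-- (objective: alternative).

-- ===== PORT A =====
def group_from_minimal_grid_py (visibility_order_grid : List (List Int)) (target : String) (max_order : Int) : List (List String) :=
  visibility_order_grid.foldl (fun grouped row =>
    let grouped_row := row.foldl (fun grouped_row value =>
      let label : Int := value
      grouped_row ++ [
        if label = -2 then "blocked"
        else if label = -1 then "unreachable"
        else if label = 0 then "L"
        else if label = 1 ∧ max_order ≥ 1 then "I1"
        else if label = 2 ∧ target = "irt2" ∧ max_order ≥ 2 then "I2"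
        else "unreachable"]) []
    grouped ++ [grouped_row]) []

-- ===== PORT B =====
-- each pass overwrites out[i][j] with the label wherever grid[i][j] equals the code;
-- the nested index loops over (grid, out) are transcribed as a cellwise zip-map.
def group_from_minimal_grid_py_alt (visibility_order_grid : List (List Int)) (target : String) (max_order : Int) : List (List String) :=
  let out := visibility_order_grid.map (fun row => List.replicate row.length "unreachable")
  let passes : List (Int × String) := [(-2, "blocked"), (0, "L")]
  let passes := if max_order ≥ 1 then passes ++ [(1, "I1")] else passes
  let passes := if target = "irt2" ∧ max_order ≥ 2 then passes ++ [(2, "I2")] else passes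
  passes.foldl (fun out p =>
    (visibility_order_grid.zip out).map (fun r =>
      (r.1.zip r.2).map (fun q => if q.1 = p.1 then p.2 else q.2))) out

-- ===== PRECONDITION & SPEC =====
def Spec_group_from_minimal_grid_py (visibility_order_grid : List (List Int)) (target : String) (max_order : Int) (out : List (List String)) : Prop := out = group_from_minimal_grid_py_alt visibility_order_grid target max_order
instance (visibility_order_grid : List (List Int)) (target : String) (max_order : Int) (out : List (List String)) : Decidable (Spec_group_from_minimal_grid_py visibility_order_grid target max_order out) := by unfold Spec_group_from_minimal_grid_py; infer_instance

-- ===== CLAIM (what is proved, stated in full; the proofs are below) =====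
def Claim_equal_group_from_minimal_grid_py : Prop := ∀ (visibility_order_grid : List (List Int)) (target : String) (max_order : Int), Dom_group_from_minimal_grid_py visibility_order_grid target max_order → Spec_group_from_minimal_grid_py visibility_order_grid target max_order (group_from_minimal_grid_py visibility_order_grid target max_order)

-- ===== LEMMAS AND PROOFS =====

-- foldl-append accumulation equals map
theorem pv_foldl_map {α β : Type} (f : α → β) (l : List α) (acc : List β) :
    l.foldl (fun a x => a ++ [f x]) acc = acc ++ l.map f := by
  induction l generalizing acc with
  | nil => simp
  | cons x xs ih => simp [List.foldl, ih]

-- mapping over a list zipped with its own image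
theorem pv_zip_map_self {α β γ : Type} (h : α → β) (k : α × β → γ) (l : List α) :
    (l.zip (l.map h)).map k = l.map (fun x => k (x, h x)) := by
  induction l with
  | nil => rfl
  | cons x xs ih => simp [ih]

-- one paint pass over a cellwise image of the grid is again a cellwise image
theorem pv_pass (g : List (List Int)) (f : Int → String) (p : Int × String) :
    ((g.zip (g.map (fun row => row.map f))).map (fun r =>
      (r.1.zip r.2).map (fun q => if q.1 = p.1 then p.2 else q.2))) =
    g.map (fun row => row.map (fun v => if v = p.1 then p.2 else f v)) := by
  rw [pv_zip_map_self]
  apply List.map_congr_left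
  intro row _
  rw [pv_zip_map_self]

-- folding the paint passes keeps the state a cellwise image of the grid
theorem pv_fold_passes (ps : List (Int × String)) (g : List (List Int)) (f : Int → String) :
    ps.foldl (fun out p =>
      (g.zip out).map (fun r =>
        (r.1.zip r.2).map (fun q => if q.1 = p.1 then p.2 else q.2)))
      (g.map (fun row => row.map f)) =
    g.map (fun row => row.map (fun v =>
      ps.foldl (fun acc p => if v = p.1 then p.2 else acc) (f v))) := by
  induction ps generalizing f with
  | nil => rfl
  | cons p ps ih =>
      simp only [List.foldl_cons]
      rw [pv_pass, ih]

-- per-cell: A's branch cascade equals the fold over the active passes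
theorem pv_cell (target : String) (max_order : Int) (v : Int) :
    (if v = -2 then "blocked"
     else if v = -1 then "unreachable"
     else if v = 0 then "L"
     else if v = 1 ∧ max_order ≥ 1 then "I1"
     else if v = 2 ∧ target = "irt2" ∧ max_order ≥ 2 then "I2"
     else "unreachable") =
    (let passes : List (Int × String) := [(-2, "blocked"), (0, "L")]
     let passes := if max_order ≥ 1 then passes ++ [(1, "I1")] else passes
     let passes := if target = "irt2" ∧ max_order ≥ 2 then passes ++ [(2, "I2")] else passes
     passes.foldl (fun acc p => if v = p.1 then p.2 else acc) "unreachable") := by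
  by_cases hm1 : max_order ≥ 1 <;> by_cases hm2 : target = "irt2" ∧ max_order ≥ 2
  all_goals simp only [hm1, hm2, if_pos, if_neg, not_false_iff, List.foldl]
  all_goals split_ifs
  all_goals first
    | rfl
    | omega
    | (exfalso; exact hm2 ⟨by assumption, by omega⟩)
    | simp_all

-- ===== VERDICT (by name: the statement is the Claim_ definition above) =====
theorem group_from_minimal_grid_py_spec : Claim_equal_group_from_minimal_grid_py := by
  intro g target max_order _
  unfold Spec_group_from_minimal_grid_py group_from_minimal_grid_py group_from_minimal_grid_py_alt
  rw [pv_foldl_map]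
  simp only [List.nil_append]
  have hinit : g.map (fun row => List.replicate row.length "unreachable")
      = g.map (fun row => row.map (fun _ => "unreachable")) := by
    apply List.map_congr_left; intro row _; simp
  rw [hinit, pv_fold_passes]
  apply List.map_congr_left
  intro row _
  rw [pv_foldl_map]
  simp only [List.nil_append]
  apply List.map_congr_left
  intro v _
  exact pv_cell target max_order v
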